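-- pv_equiv track=rewrite | github.com/Bill-Portugues/Proyect-Euler---Python | 40 - Champernowne's constant.py | Calculate_Irrational_digit
-- ===== SOURCE A (Python) =====
-- def Calculate_Irrational_digit(num):
--
--     dict=[]
--     sum = 0
--     for x in range(1,num):
--         for y in range(0,str(x).__len__(),1):
--             sum+=1
--             dict.append(int(str(x)[y]))
--             #print (sum,"-",str(x)[y])
--
--
--     return dict
-- ===== SOURCE B (Python) =====
-- def Calculate_Irrational_digit(num):
--     # arithmetic digit extraction (no str), counting down, output built back-to-front
--     out = []
--     x = num - 1
--     while x >= 1: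
--         n = x
--         while n > 0:
--             out.append(n % 10)
--             n //= 10
--         x -= 1
--     out.reverse()
--     return out
-- ===== Notes on version B (the rewrite author's own statement) =====
-- stated objective: alternative
-- what changed: Replaces A's string-based nested loops (str(x) with positional indexing per character, ascending x) by pure arithmetic digit extraction via % 10 and // 10, counting x DOWN from num-1 and emitting digits least-significant-first, then one final reverse restores the order; no string conversion at all.
import Mathlib
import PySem

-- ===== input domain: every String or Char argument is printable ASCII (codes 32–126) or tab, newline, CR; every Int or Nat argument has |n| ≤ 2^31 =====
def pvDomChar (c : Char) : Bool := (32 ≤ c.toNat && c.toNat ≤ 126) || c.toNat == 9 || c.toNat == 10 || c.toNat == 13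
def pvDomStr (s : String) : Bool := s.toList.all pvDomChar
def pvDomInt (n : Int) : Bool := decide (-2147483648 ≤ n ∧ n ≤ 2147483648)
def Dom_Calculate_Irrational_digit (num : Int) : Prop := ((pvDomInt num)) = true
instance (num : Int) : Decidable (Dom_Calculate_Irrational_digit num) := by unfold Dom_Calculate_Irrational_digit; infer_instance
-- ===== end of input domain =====

-- B extracts digits arithmetically (% 10, // 10), counting x down from num-1 and
-- emitting digits least-significant-first, with one final reverse; A converts each
-- ascending x to a string and indexes its characters (its 'sum' counter is dead).

-- int(c) for a one-character string c (always a digit here)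
def pvDigit (c : Char) : Int := (PySem.Int.ofChars? [c]).getD 0

-- ===== PORT A =====
-- state = (dict, sum); str(x)[y] via pyGetD on the digit characters of x
def Calculate_Irrational_digit (num : Int) : List Int :=
  ((PySem.List.pyRange 1 num 1).foldl
    (fun (st : List Int × Int) x =>
      let cs := PySem.Int.toChars x
      (PySem.List.pyRange 0 (cs.length : Int) 1).foldl
        (fun st y => (st.1 ++ [pvDigit (PySem.List.pyGetD cs y ' ')], st.2 + 1)) st)
    ([], 0)).1

-- ===== PORT B =====
-- inner 'while n > 0: out.append(n % 10); n //= 10' (n is a nonnegative int, kept as Nat)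
def pvDigitsLoop : Nat → List Int → List Int
  | 0, acc => acc
  | n + 1, acc => pvDigitsLoop ((n + 1) / 10) (acc ++ [((n + 1) % 10 : Int)])
decreasing_by exact Nat.div_lt_self (Nat.succ_pos n) (by norm_num)

-- outer 'while x >= 1: …; x -= 1' counting down from num-1
def pvCountLoop : Nat → List Int → List Int
  | 0, acc => acc
  | x + 1, acc => pvCountLoop x (pvDigitsLoop (x + 1) acc)

def Calculate_Irrational_digit_alt (num : Int) : List Int :=
  (pvCountLoop (num - 1).toNat []).reverse

-- ===== PRECONDITION & SPEC =====
def Spec_Calculate_Irrational_digit (num : Int) (out : List Int) : Prop := out = Calculate_Irrational_digit_alt num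
instance (num : Int) (out : List Int) : Decidable (Spec_Calculate_Irrational_digit num out) := by unfold Spec_Calculate_Irrational_digit; infer_instance

-- ===== CLAIM (what is proved, stated in full; the proofs are below) =====
def Claim_equal_Calculate_Irrational_digit : Prop := ∀ (num : Int), Dom_Calculate_Irrational_digit num → Spec_Calculate_Irrational_digit num (Calculate_Irrational_digit num)

-- ===== LEMMAS AND PROOFS =====

-- digits of n least-significant-first (empty for 0)
def lsbDigits : Nat → List Int
  | 0 => []
  | n + 1 => ((n + 1) % 10 : Int) :: lsbDigits ((n + 1) / 10)
decreasing_by exact Nat.div_lt_self (Nat.succ_pos n) (by norm_num)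

-- the characters Nat.toDigitsCore produces, least-significant-first
def lsbChars (n : Nat) : List Char :=
  if h : n / 10 = 0 then [Nat.digitChar (n % 10)]
  else Nat.digitChar (n % 10) :: lsbChars (n / 10)
decreasing_by exact Nat.div_lt_self (Nat.pos_of_ne_zero (fun h0 => h (by simp [h0]))) (by norm_num)

theorem pvDigitsLoop_eq (n : Nat) (acc : List Int) :
    pvDigitsLoop n acc = acc ++ lsbDigits n := by
  induction n using Nat.strong_induction_on generalizing acc with
  | _ n ih =>
    match n with
    | 0 => simp [pvDigitsLoop, lsbDigits]
    | m + 1 =>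
      rw [pvDigitsLoop, lsbDigits,
        ih ((m + 1) / 10) (Nat.div_lt_self (Nat.succ_pos m) (by norm_num))]
      simp

theorem pvCountLoop_eq (k : Nat) (acc : List Int) :
    pvCountLoop k acc = acc ++ (List.range' 1 k).reverse.flatMap lsbDigits := by
  induction k generalizing acc with
  | zero => simp [pvCountLoop]
  | succ k ih =>
    rw [pvCountLoop, ih, pvDigitsLoop_eq, List.range'_1_concat]
    simp [Nat.add_comm]

-- a plain foldl over the characters appends their digits and counts them
theorem pvFoldChars (cs : List Char) (st : List Int × Int) :
    cs.foldl (fun (st : List Int × Int) c => (st.1 ++ [pvDigit c], st.2 + 1)) st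
    = (st.1 ++ cs.map pvDigit, st.2 + cs.length) := by
  induction cs generalizing st with
  | nil => simp
  | cons c cs ih => simp [ih]; omega

-- the inner loop of A appends the digits of cs and bumps the counter by cs.length
theorem pvInner (cs : List Char) (st : List Int × Int) :
    (PySem.List.pyRange 0 (cs.length : Int) 1).foldl
      (fun st y => (st.1 ++ [pvDigit (PySem.List.pyGetD cs y ' ')], st.2 + 1)) st
    = (st.1 ++ cs.map pvDigit, st.2 + cs.length) := by
  have h := PySem.List.foldl_pyRange_pyGetD (xs := cs) (a := 0)
    (f := fun (st : List Int × Int) (c : Char) => (st.1 ++ [pvDigit c], st.2 + 1))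
    (d := ' ') (init := st) (by omega)
  simp only [PySem.List.len, Int.toNat_zero, List.drop_zero] at h
  rw [h, pvFoldChars]

-- the outer loop of A accumulates the flatMap of the per-number digit lists
theorem pvOuter (L : List Int) (st : List Int × Int) :
    (L.foldl
      (fun (st : List Int × Int) x =>
        let cs := PySem.Int.toChars x
        (PySem.List.pyRange 0 (cs.length : Int) 1).foldl
          (fun st y => (st.1 ++ [pvDigit (PySem.List.pyGetD cs y ' ')], st.2 + 1)) st)
      st).1
    = st.1 ++ L.flatMap (fun x => (PySem.Int.toChars x).map pvDigit) := by
  induction L generalizing st with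
  | nil => simp
  | cons x L ih =>
    rw [List.foldl_cons, ih]
    simp [pvInner]

-- Nat.toDigitsCore emits exactly lsbChars, reversed
theorem pvToDigitsCore_eq (fuel : Nat) : ∀ (n : Nat) (ds : List Char), n < fuel →
    Nat.toDigitsCore 10 fuel n ds = (lsbChars n).reverse ++ ds := by
  induction fuel with
  | zero => intro n ds h; omega
  | succ fuel ih =>
    intro n ds h
    rw [Nat.toDigitsCore, lsbChars]
    by_cases h10 : n / 10 = 0
    · simp [h10]
    · have hlt : n / 10 < fuel := by omega
      simp [h10, ih _ _ hlt]

-- pvDigit of a decimal digit character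
theorem pvDigit_digitChar (d : Nat) (hd : d < 10) :
    pvDigit (Nat.digitChar d) = (d : Int) := by
  interval_cases d <;> decide

-- mapping pvDigit over the character digits gives the numeric digits (n ≥ 1)
theorem pvMap_lsbChars (n : Nat) (hn : 1 ≤ n) :
    (lsbChars n).map pvDigit = lsbDigits n := by
  induction n using Nat.strong_induction_on with
  | _ n ih =>
    match n, hn with
    | m + 1, _ =>
      rw [lsbChars, lsbDigits]
      by_cases h10 : (m + 1) / 10 = 0
      · simp [h10, pvDigit_digitChar _ (Nat.mod_lt _ (by norm_num)), lsbDigits]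
      · rw [dif_neg h10]
        have hlt : (m + 1) / 10 < m + 1 := Nat.div_lt_self (Nat.succ_pos m) (by norm_num)
        simp [pvDigit_digitChar _ (Nat.mod_lt _ (by norm_num)),
          ih _ hlt (Nat.pos_of_ne_zero h10)]

-- A's digit list of a positive integer is B's lsbDigits, reversed
theorem pvToChars_digits (m : Nat) (hm : 1 ≤ m) :
    (PySem.Int.toChars (m : Int)).map pvDigit = (lsbDigits m).reverse := by
  have : PySem.Int.toChars (m : Int) = Nat.toDigits 10 m := by
    simp [PySem.Int.toChars]
  rw [this, Nat.toDigits, pvToDigitsCore_eq (m + 1) m [] (by omega)]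
  simp [← pvMap_lsbChars m hm]

-- ===== VERDICT (by name: the statement is the Claim_ definition above) =====
theorem Calculate_Irrational_digit_spec : Claim_equal_Calculate_Irrational_digit := by
  intro num _
  unfold Spec_Calculate_Irrational_digit Calculate_Irrational_digit Calculate_Irrational_digit_alt
  rw [pvOuter, pvCountLoop_eq, PySem.List.pyRange_of_pos 1 num (by norm_num)]
  have hc : (if (1 : Int) < num then ((num - 1 + 1 - 1) / 1).toNat else 0) = (num - 1).toNat := by
    split_ifs with h <;> omega
  rw [hc, List.range'_eq_map_range]
  have hdig : ∀ i : Nat, (PySem.Int.toChars (1 + (i : Int))).map pvDigit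
      = (lsbDigits (1 + i)).reverse := by
    intro i
    have : (1 : Int) + (i : Int) = ((1 + i : Nat) : Int) := by push_cast; ring
    rw [this, pvToChars_digits (1 + i) (by omega)]
  simp only [List.nil_append, List.flatMap_map, List.reverse_flatMap, List.reverse_reverse,
    Function.comp_def, one_mul, hdig]
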